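-- pv_equiv track=rewrite | github.com/rschuitema/sqatt | src/dotcover/dotcover.py | get_namespaces
-- ===== SOURCE A (Python) =====
-- def get_namespaces(line, separator):
--     """Get all the namespaces defined in line based upon the provided separator."""
--
--     namespaces = set()
--     if len(line) > 0 and line not in namespaces:
--         namespaces.add(line)
--
--         parts = line.rsplit(separator, 1)
--         while parts[0] not in namespaces:
--             namespaces.add(parts[0])
--             parts = parts[0].rsplit(separator, 1)
--
--     return namespaces
-- ===== SOURCE B (Python) =====
-- def get_namespaces(line, separator):
--     """Collect the line and every prefix cut at a separator, scanning occurrences once."""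
--     result = set()
--     if line:
--         if not separator:
--             raise ValueError("empty separator")
--         result.add(line)
--         occurrences = []
--         j = line.find(separator)
--         while j != -1:
--             occurrences.append(j)
--             j = line.find(separator, j + 1)
--         current = len(line)
--         for j in reversed(occurrences):
--             if j + len(separator) <= current:
--                 result.add(line[:j])
--                 current = j
--     return result
-- ===== Notes on version B (the rewrite author's own statement) =====
-- stated objective: alternative
-- what changed: A repeatedly rsplits the current prefix from the right until it hits a string already collected; B scans the line once collecting all separator occurrence positions, then makes one greedy right-to-left pass over those positions emitting each prefix by slicing the original line (B validates the separator and raises ValueError on an empty one, as A does).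
import Mathlib
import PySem

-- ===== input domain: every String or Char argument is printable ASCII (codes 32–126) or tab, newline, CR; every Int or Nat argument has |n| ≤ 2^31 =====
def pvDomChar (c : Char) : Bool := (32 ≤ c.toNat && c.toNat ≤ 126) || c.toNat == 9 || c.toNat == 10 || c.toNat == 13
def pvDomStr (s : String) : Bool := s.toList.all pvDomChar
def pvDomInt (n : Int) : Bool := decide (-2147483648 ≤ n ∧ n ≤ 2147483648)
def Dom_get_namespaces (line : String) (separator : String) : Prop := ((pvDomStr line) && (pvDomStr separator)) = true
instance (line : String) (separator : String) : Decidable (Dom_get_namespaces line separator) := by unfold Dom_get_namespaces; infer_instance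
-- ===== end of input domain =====

-- B replaces A's repeated rsplit-from-the-right loop by one forward scan collecting all
-- separator occurrence positions, then a single greedy pass over them from the right
-- (objective: alternative decomposition; return value only — neither mutates its arguments).

-- ===== PORT A =====
-- hand port of t.rsplit(sep, 1)[0]: exact for sep ≠ "" (sep = "" raises ValueError in Python; excluded by Pre_)
def pvRsplit1Head (t p : List Char) : List Char :=
  let i := PySem.Chars.rfind t p
  if i = -1 then t else t.take i.toNat

-- the 'while parts[0] not in namespaces' loop; fuel only makes the recursion structural
def pvALoop (p : List Char) : Nat → PySem.Set String → List Char → PySem.Set String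
  | 0, ns, _ => ns
  | fuel+1, ns, t =>
    if ns.contains (String.ofList t) then ns
    else pvALoop p fuel (ns.add (String.ofList t)) (pvRsplit1Head t p)

def get_namespaces (line : String) (separator : String) : List String :=
  let namespaces : PySem.Set String := []
  if 0 < line.toList.length && !(namespaces.contains line) then
    let namespaces := namespaces.add line
    pvALoop separator.toList (line.toList.length + 2) namespaces
      (pvRsplit1Head line.toList separator.toList)
  else namespaces

-- ===== PORT B =====
-- the 'while j != -1' occurrence-collecting loop of Source B; fuel only makes the recursion structural
def pvBFindLoop (s p : List Char) : Nat → Int → List Int → List Int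
  | 0, _, occs => occs
  | fuel+1, j, occs =>
    if j = -1 then occs
    else pvBFindLoop s p fuel (PySem.Chars.findFrom s p (j+1) none) (occs ++ [j])

def get_namespaces_alt (line : String) (separator : String) : List String :=
  let result : PySem.Set String := []
  if line.toList ≠ [] then
    -- Source B raises ValueError("empty separator") here; excluded by Pre_, value irrelevant
    if separator.toList = [] then []
    else
      let result := result.add line
      let occs := pvBFindLoop line.toList separator.toList (line.toList.length + 2)
        (PySem.Chars.find line.toList separator.toList) []
      -- for j in reversed(occurrences): …  (state = (result, current))
      (occs.reverse.foldl (fun (st : PySem.Set String × Int) j =>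
          if j + (separator.toList.length : Int) ≤ st.2
          then (st.1.add (String.ofList (line.toList.take j.toNat)), j) else st)
        (result, (line.toList.length : Int))).1
  else result

-- ===== PRECONDITION & SPEC =====
-- Pre_ excludes only nonempty line with empty separator, where both A and B raise ValueError.
def Pre_get_namespaces (line : String) (separator : String) : Prop :=
  line = "" ∨ separator ≠ ""
instance (line : String) (separator : String) : Decidable (Pre_get_namespaces line separator) := by
  unfold Pre_get_namespaces; infer_instance

def pvWitness_get_namespaces : String × String := ("aa.bb.cc", ".")

def Spec_get_namespaces (line : String) (separator : String) (out : List String) : Prop := out = get_namespaces_alt line separator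
instance (line : String) (separator : String) (out : List String) : Decidable (Spec_get_namespaces line separator out) := by unfold Spec_get_namespaces; infer_instance

-- ===== CLAIM (what is proved, stated in full; the proofs are below) =====
def Claim_equal_get_namespaces : Prop := ∀ (line : String) (separator : String), Dom_get_namespaces line separator → Pre_get_namespaces line separator → Spec_get_namespaces line separator (get_namespaces line separator)

-- ===== LEMMAS AND PROOFS =====

def pvQ (s p : List Char) (c : Nat) (j : Nat) : Bool :=
  p.isPrefixOf (s.drop j) && decide (j + p.length ≤ c)

def pvMaxBelow (P : Nat → Bool) : Nat → Option Nat
  | 0 => if P 0 then some 0 else none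
  | c+1 => if P (c+1) then some (c+1) else pvMaxBelow P c

theorem pvMaxBelow_congr {P P' : Nat → Bool} : ∀ c : Nat, (∀ j ≤ c, P j = P' j) → pvMaxBelow P c = pvMaxBelow P' c
  | 0, h => by simp [pvMaxBelow, h 0 (le_refl 0)]
  | c+1, h => by
      simp only [pvMaxBelow, h (c+1) (le_refl _)]
      rw [pvMaxBelow_congr c (fun j hj => h j (Nat.le_succ_of_le hj))]

theorem pvRfindGo_eq (t p : List Char) : ∀ c : Nat,
    PySem.Chars.rfind.go t p c = match pvMaxBelow (fun j => p.isPrefixOf (t.drop j)) c with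
      | none => -1 | some j => (j : Int)
  | 0 => by simp [PySem.Chars.rfind.go, pvMaxBelow]; split <;> simp_all
  | c+1 => by
      rw [PySem.Chars.rfind.go]
      simp only [pvMaxBelow]
      split <;> simp_all [pvRfindGo_eq t p c]

theorem pvMaxBelow_some {P : Nat → Bool} : ∀ {c j : Nat}, pvMaxBelow P c = some j → j ≤ c ∧ P j = true := by
  intro c
  induction c with
  | zero => intro j h; simp [pvMaxBelow] at h; rcases h with ⟨h1, rfl⟩; exact ⟨le_refl 0, h1⟩
  | succ c ih =>
      intro j h; rw [pvMaxBelow] at h; split at h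
      · simp_all
      · have := ih h; exact ⟨Nat.le_succ_of_le this.1, this.2⟩

theorem pvMaxBelow_none {P : Nat → Bool} : ∀ {c : Nat}, (∀ j ≤ c, P j = false) → pvMaxBelow P c = none := by
  intro c
  induction c with
  | zero => intro h; simp [pvMaxBelow, h 0 (le_refl 0)]
  | succ c ih => intro h; rw [pvMaxBelow]; simp [h (c+1) (le_refl _)]
                 exact ih (fun j hj => h j (Nat.le_succ_of_le hj))

theorem pvMaxBelow_eq_some {P : Nat → Bool} : ∀ {c j : Nat}, j ≤ c → P j = true →
    (∀ i, i ≤ c → P i = true → i ≤ j) → pvMaxBelow P c = some j := by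
  intro c
  induction c with
  | zero => intro j hj hP _; interval_cases j; simp [pvMaxBelow, hP]
  | succ c ih =>
      intro j hj hP hmax
      rw [pvMaxBelow]
      by_cases hc : P (c+1) = true
      · have := hmax (c+1) (le_refl _) hc; have : j = c + 1 := by omega
        simp [hc, this]
      · have hj' : j ≤ c := by
          by_contra hlt
          have : j = c+1 := by omega
          exact hc (this ▸ hP)
        simp [hc]
        exact ih hj' hP (fun i hi hPi => hmax i (Nat.le_succ_of_le hi) hPi)

def pvC (s p : List Char) (c : Nat) : Option Nat := pvMaxBelow (pvQ s p c) c

theorem pvPrefix_take (s p : List Char) (c j : Nat) (hp : p ≠ []) :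
    p.isPrefixOf ((s.take c).drop j) = pvQ s p c j := by
  rw [pvQ, List.drop_take, Bool.eq_iff_iff]
  simp only [List.isPrefixOf_iff_prefix, Bool.and_eq_true, decide_eq_true_eq, List.prefix_take_iff]
  have hlen := List.length_pos_of_ne_nil hp
  constructor
  · rintro ⟨h1, h2⟩; exact ⟨h1, by omega⟩
  · rintro ⟨h1, h2⟩; exact ⟨h1, by omega⟩

theorem pvC_lt {s p : List Char} {c j : Nat} (hp : p ≠ []) (h : pvC s p c = some j) : j < c := by
  have := pvMaxBelow_some h
  have h2 := this.2
  rw [pvQ] at h2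
  simp at h2
  have := List.length_pos_of_ne_nil hp
  omega

theorem pvRsplit1Head_take (s p : List Char) (c : Nat) (hp : p ≠ []) (hc : c ≤ s.length) :
    pvRsplit1Head (s.take c) p = match pvC s p c with
      | none => s.take c | some j => s.take j := by
  rw [pvRsplit1Head, PySem.Chars.rfind]
  have hlen : (s.take c).length = c := by simp [List.length_take]; omega
  rw [hlen, pvRfindGo_eq]
  rw [pvMaxBelow_congr c (fun j _ => pvPrefix_take s p c j hp)]
  rw [← pvC]
  cases hC : pvC s p c with
  | none => simp
  | some j =>
      have hj := pvC_lt hp hC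
      simp [List.take_take]
      omega

def pvChain (s p : List Char) : Nat → Nat → List Nat
  | 0, _ => []
  | f+1, c => match pvC s p c with
    | none => []
    | some j => j :: pvChain s p f j

theorem pvChain_irrel (s p : List Char) (hp : p ≠ []) : ∀ f f' c, c < f → c < f' →
    pvChain s p f c = pvChain s p f' c := by
  intro f
  induction f with
  | zero => intro f' c h; omega
  | succ f ih =>
      intro f' c h h'
      cases f' with
      | zero => omega
      | succ f' =>
          rw [pvChain, pvChain]
          cases hC : pvC s p c with
          | none => rfl
          | some j =>
              have hj := pvC_lt hp hC
              simp only []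
              rw [ih f' j (by omega) (by omega)]

-- helper: distinct takes are distinct strings
theorem pvTake_ne (s : List Char) {d j : Nat} (hd : d ≤ s.length) (hj : j < d) :
    String.ofList (s.take d) ≠ String.ofList (s.take j) := by
  intro h
  rw [String.ofList_inj] at h
  have : (s.take d).length = (s.take j).length := by rw [h]
  simp [List.length_take] at this
  omega

theorem pvALoop_chain (s p : List Char) (hp : p ≠ []) :
    ∀ (fuel c : Nat) (ns : PySem.Set String), c ≤ s.length → c + 1 ≤ fuel →
    (∀ x ∈ ns, ∃ d, c ≤ d ∧ d ≤ s.length ∧ x = String.ofList (s.take d)) →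
    String.ofList (s.take c) ∈ ns →
    pvALoop p fuel ns (pvRsplit1Head (s.take c) p)
      = ns ++ (pvChain s p fuel c).map (fun j => String.ofList (s.take j)) := by
  intro fuel
  induction fuel with
  | zero => intro c ns h1 h2; omega
  | succ fuel ih =>
      intro c ns hc hfuel hmem hcur
      rw [pvALoop, pvRsplit1Head_take s p c hp hc, pvChain]
      cases hC : pvC s p c with
      | none =>
          rw [if_pos ((PySem.Set.contains_iff ns _).2 hcur)]
          simp
      | some j =>
          have hj := pvC_lt hp hC
          have hnotmem : String.ofList (s.take j) ∉ ns := by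
            intro hmem'
            obtain ⟨d, hd1, hd2, heq⟩ := hmem _ hmem'
            exact pvTake_ne s hd2 (by omega) heq.symm
          have hcf : ¬ (PySem.Set.contains ns (String.ofList (s.take j)) = true) := by
            rw [PySem.Set.contains_iff]; exact hnotmem
          rw [if_neg hcf, PySem.Set.add, if_neg hcf]
          rw [ih j (ns ++ [String.ofList (s.take j)]) (by omega) (by omega)
            (by intro x hx
                rcases List.mem_append.1 hx with hx | hx
                · obtain ⟨d, hd1, hd2, heq⟩ := hmem _ hx
                  exact ⟨d, by omega, hd2, heq⟩
                · simp at hx; exact ⟨j, le_refl _, by omega, hx⟩)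
            (by simp)]
          simp

theorem pvNoPrefixFrom (s p : List Char) (k : Nat)
    (h : ¬ p <:+: s.drop k) : ∀ j, k ≤ j → ¬ p <+: s.drop j := by
  intro j hkj hpre
  apply h
  rw [← PySem.Chars.isIn_iff_infix, ← PySem.Chars.exists_prefix_drop_iff_isIn]
  exact ⟨j - k, by rwa [List.drop_drop, Nat.add_sub_cancel' hkj]⟩

theorem pvBLoop_occs (s p : List Char) (hp : p ≠ []) :
    ∀ (fuel k : Nat) (acc : List Int), k ≤ s.length → s.length + 1 - k ≤ fuel →
    pvBFindLoop s p fuel (PySem.Chars.findFrom s p (k : Int) none) acc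
      = acc ++ (((List.range' k (s.length + 1 - k)).filter
          (fun j => p.isPrefixOf (s.drop j))).map (fun j => (j : Int))) := by
  intro fuel
  induction fuel with
  | zero => intro k acc hk hf; omega
  | succ fuel ih =>
      intro k acc hk hf
      by_cases hr : PySem.Chars.findFrom s p (k : Int) none = -1
      · have hno : ∀ j, k ≤ j → ¬ p <+: s.drop j :=
          pvNoPrefixFrom s p k ((PySem.Chars.findFrom_natCast_eq_neg_one_iff s p k hk).1 hr)
        have hfil : (List.range' k (s.length + 1 - k)).filter
            (fun j => p.isPrefixOf (s.drop j)) = [] := by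
          rw [List.filter_eq_nil_iff]
          intro j hj
          have : k ≤ j := (List.mem_range'_1.1 hj).1
          simp [List.isPrefixOf_iff_prefix]
          exact hno j this
        rw [pvBFindLoop, if_pos hr, hfil]
        simp
      · obtain ⟨hkr, hpre, hmin⟩ := PySem.Chars.findFrom_natCast_spec s p k hk hr
        set r := PySem.Chars.findFrom s p (k : Int) none with hrdef
        have hr0 : 0 ≤ r := le_trans (by exact_mod_cast Nat.zero_le k) hkr
        have hrn : r = ((r.toNat : Nat) : Int) := by omega
        have hkrn : k ≤ r.toNat := by omega
        have hlt : r.toNat < s.length := by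
          by_contra hge
          have : s.drop r.toNat = [] := List.drop_eq_nil_of_le (by omega)
          rw [this] at hpre
          exact hp (List.prefix_nil.1 hpre)
        rw [pvBFindLoop, if_neg hr]
        have hstep : r + 1 = (((r.toNat + 1 : Nat)) : Int) := by omega
        rw [hstep, ih (r.toNat + 1) (acc ++ [r]) (by omega) (by omega)]
        have hsplit : List.range' k (s.length + 1 - k)
            = List.range' k (r.toNat - k) ++ List.range' r.toNat (s.length + 1 - r.toNat) := by
          have := @List.range'_append k (r.toNat - k) (s.length + 1 - r.toNat) 1
          rw [Nat.one_mul] at this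
          rw [show k + (r.toNat - k) = r.toNat by omega] at this
          rw [show r.toNat - k + (s.length + 1 - r.toNat) = s.length + 1 - k by omega] at this
          exact this.symm
        rw [hsplit, List.filter_append]
        have hfil1 : (List.range' k (r.toNat - k)).filter (fun j => p.isPrefixOf (s.drop j)) = [] := by
          rw [List.filter_eq_nil_iff]
          intro j hj
          have hj' := List.mem_range'_1.1 hj
          simp [List.isPrefixOf_iff_prefix]
          exact hmin j hj'.1 (by omega)
        have hcons : List.range' r.toNat (s.length + 1 - r.toNat)
            = r.toNat :: List.range' (r.toNat + 1) (s.length - r.toNat) := by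
          rw [show s.length + 1 - r.toNat = (s.length - r.toNat) + 1 by omega, List.range'_succ]
        rw [hfil1, hcons]
        simp only [List.nil_append, List.filter_cons]
        rw [if_pos (by simpa [List.isPrefixOf_iff_prefix] using hpre)]
        simp [hrn.symm, show s.length + 1 - (r.toNat + 1) = s.length - r.toNat by omega]

theorem pvFold_greedy (s p : List Char) (hp : p ≠ []) :
    ∀ (m c : Nat) (res : PySem.Set String), c ≤ s.length →
    (∀ j, p.isPrefixOf (s.drop j) = true → j + p.length ≤ c → j < m) →
    (∀ x ∈ res, ∃ d, c ≤ d ∧ d ≤ s.length ∧ x = String.ofList (s.take d)) →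
    ∃ c' : Int,
      (((List.range m).filter (fun j => p.isPrefixOf (s.drop j))).map (fun j => (j : Int))).reverse.foldl
        (fun (st : PySem.Set String × Int) j =>
          if j + (p.length : Int) ≤ st.2
          then (st.1.add (String.ofList (s.take j.toNat)), j) else st)
        (res, (c : Int))
      = (res ++ ((pvChain s p (c+1) c).map (fun j => String.ofList (s.take j))), c') := by
  intro m
  induction m with
  | zero =>
      intro c res hc hbound hres
      have hC : pvC s p c = none := by
        apply pvMaxBelow_none
        intro j hj
        rw [pvQ]
        by_cases h1 : p.isPrefixOf (s.drop j) = true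
        · by_cases h2 : j + p.length ≤ c
          · exact absurd (hbound j h1 h2) (by omega)
          · simp [h1, h2]
        · simp [h1]
      refine ⟨(c : Int), ?_⟩
      rw [pvChain]
      simp [hC]
  | succ m ih =>
      intro c res hc hbound hres
      by_cases hm : p.isPrefixOf (s.drop m) = true
      · have h2 : ((((List.range (m+1)).filter (fun j => p.isPrefixOf (s.drop j))).map
            (fun j => (j : Int))).reverse)
            = (m : Int) :: (((List.range m).filter (fun j => p.isPrefixOf (s.drop j))).map
              (fun j => (j : Int))).reverse := by
          rw [List.range_succ, List.filter_append]
          simp [hm]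
        rw [h2, List.foldl_cons]
        by_cases hc2 : m + p.length ≤ c
        · rw [if_pos (by push_cast; omega)]
          have hmc : m < c := by have := List.length_pos_of_ne_nil hp; omega
          have hnotmem : String.ofList (s.take ((m : Int).toNat)) ∉ res := by
            rw [Int.toNat_natCast]
            intro hmem'
            obtain ⟨d, hd1, hd2, heq⟩ := hres _ hmem'
            exact pvTake_ne s hd2 (by omega) heq.symm
          rw [PySem.Set.add, if_neg (by rw [PySem.Set.contains_iff]; exact hnotmem)]
          rw [Int.toNat_natCast]
          obtain ⟨c', heq⟩ := ih m (res ++ [String.ofList (s.take m)]) (by omega)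
            (by intro j h1 h2
                have := List.length_pos_of_ne_nil hp
                omega)
            (by intro x hx
                rcases List.mem_append.1 hx with hx | hx
                · obtain ⟨d, hd1, hd2, hx⟩ := hres _ hx
                  exact ⟨d, by omega, hd2, hx⟩
                · simp at hx
                  exact ⟨m, le_refl _, by omega, hx⟩)
          refine ⟨c', ?_⟩
          rw [heq]
          have hCc : pvC s p c = some m := by
            apply pvMaxBelow_eq_some (by omega)
            · rw [pvQ, hm]
              simp
              omega
            · intro i hi hQ
              rw [pvQ] at hQ
              simp at hQ
              have := hbound i (by simp [hQ.1]) hQ.2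
              omega
          rw [show pvChain s p (c+1) c = m :: pvChain s p (m+1) m by
            rw [pvChain]
            simp only [hCc]
            rw [pvChain_irrel s p hp c (m+1) m (by omega) (by omega)]]
          simp
        · rw [if_neg (by push_cast; omega)]
          exact ih c res hc
            (by intro j h1 h2
                have h3 := hbound j h1 h2
                omega) hres
      · have h2 : (List.range (m+1)).filter (fun j => p.isPrefixOf (s.drop j))
            = (List.range m).filter (fun j => p.isPrefixOf (s.drop j)) := by
          rw [List.range_succ, List.filter_append]
          simp [hm]
        rw [h2]
        exact ih c res hc
          (by intro j h1 h2
              have h3 := hbound j h1 h2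
              have hjm : j ≠ m := fun h => hm (h ▸ h1)
              omega) hres

theorem pvA_char (line separator : String) (hl : line.toList ≠ []) (hs : separator.toList ≠ []) :
    get_namespaces line separator
      = [line] ++ (pvChain line.toList separator.toList (line.toList.length + 1)
          line.toList.length).map (fun j => String.ofList (line.toList.take j)) := by
  have hn : 0 < line.toList.length := List.length_pos_of_ne_nil hl
  rw [get_namespaces]
  simp only [PySem.Set.contains, List.contains_nil, Bool.not_false, Bool.and_true, decide_eq_true_eq]
  rw [if_pos (by simpa using hn)]
  have hadd : PySem.Set.add ([] : PySem.Set String) line = [line] := by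
    rw [PySem.Set.add]; rfl
  rw [hadd]
  have hline : line = String.ofList (line.toList.take line.toList.length) := by
    rw [List.take_length, String.ofList_toList]
  have h := pvALoop_chain line.toList separator.toList hs (line.toList.length + 2)
    line.toList.length [line] (le_refl _) (by omega)
    (by intro x hx
        simp at hx
        exact ⟨line.toList.length, le_refl _, le_refl _, by rw [hx]; exact hline⟩)
    (by rw [← hline]; simp)
  rw [List.take_length] at h
  rw [h, pvChain_irrel line.toList separator.toList hs (line.toList.length + 2)
    (line.toList.length + 1) line.toList.length (by omega) (by omega)]

theorem pvB_char (line separator : String) (hl : line.toList ≠ []) (hs : separator.toList ≠ []) :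
    get_namespaces_alt line separator
      = [line] ++ (pvChain line.toList separator.toList (line.toList.length + 1)
          line.toList.length).map (fun j => String.ofList (line.toList.take j)) := by
  have hn : 0 < line.toList.length := List.length_pos_of_ne_nil hl
  rw [get_namespaces_alt]
  simp only []
  rw [if_pos hl, if_neg hs]
  have hadd : PySem.Set.add ([] : PySem.Set String) line = [line] := by
    rw [PySem.Set.add]; rfl
  rw [hadd]
  rw [← PySem.Chars.findFrom_zero]
  rw [show (0 : Int) = ((0 : Nat) : Int) by norm_num]
  rw [pvBLoop_occs line.toList separator.toList hs (line.toList.length + 2) 0 [] (by omega) (by omega)]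
  rw [List.nil_append, Nat.sub_zero, ← List.range_eq_range']
  have hline : line = String.ofList (line.toList.take line.toList.length) := by
    rw [List.take_length, String.ofList_toList]
  obtain ⟨c', heq⟩ := pvFold_greedy line.toList separator.toList hs (line.toList.length + 1)
    line.toList.length [line] (le_refl _)
    (by intro j h1 h2
        have := List.length_pos_of_ne_nil hs
        omega)
    (by intro x hx
        simp at hx
        exact ⟨line.toList.length, le_refl _, le_refl _, by rw [hx]; exact hline⟩)
  rw [heq]

theorem pvEmpty_case (line separator : String) (hl : line.toList = []) :
    get_namespaces line separator = get_namespaces_alt line separator := by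
  rw [get_namespaces, get_namespaces_alt]
  simp [hl]

-- ===== VERDICT (by name: the statement is the Claim_ definition above) =====
theorem get_namespaces_spec : Claim_equal_get_namespaces := by
  intro line separator hdom hpre
  unfold Spec_get_namespaces
  by_cases hl : line.toList = []
  · exact pvEmpty_case line separator hl
  · have hsep : separator.toList ≠ [] := by
      intro hh
      rcases hpre with h | h
      · exact hl (by rw [h]; rfl)
      · exact h (String.toList_eq_nil_iff.1 hh)
    rw [pvA_char line separator hl hsep, pvB_char line separator hl hsep]
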